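-- pv_equiv track=rewrite | github.com/Katechon-Technology/psychic-train | plugins/arcade/stream-client/spectre/sources.py | _infer_country_from_registration
-- ===== SOURCE A (Python) =====
-- from typing import List, Dict, Optional, Any
--
-- _REG_PREFIX_COUNTRY_HINTS = (
--     ("N", "United States"),
--     ("C", "Canada"),
--     ("G", "United Kingdom"),
--     ("D", "Germany"),
--     ("F", "France"),
--     ("I", "Italy"),
--     ("EC", "Spain"),
--     ("PH", "Netherlands"),
--     ("RA", "Russia"),
--     ("RF", "Russia"),
--     ("B", "China"),
--     ("JA", "Japan"),
--     ("HL", "South Korea"),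
--     ("VT", "India"),
--     ("VH", "Australia"),
-- )
--
-- def _infer_country_from_registration(registration: Optional[str]) -> Optional[str]:
--     if not registration:
--         return None
--     reg = str(registration).strip().upper()
--     for prefix, country in _REG_PREFIX_COUNTRY_HINTS:
--         if reg.startswith(prefix):
--             return country
--     return None
-- ===== SOURCE B (Python) =====
-- _REG_PREFIX_COUNTRY_HINTS = (
--     ("N", "United States"),
--     ("C", "Canada"),
--     ("G", "United Kingdom"),
--     ("D", "Germany"),
--     ("F", "France"),
--     ("I", "Italy"),
--     ("EC", "Spain"),
--     ("PH", "Netherlands"),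
--     ("RA", "Russia"),
--     ("RF", "Russia"),
--     ("B", "China"),
--     ("JA", "Japan"),
--     ("HL", "South Korea"),
--     ("VT", "India"),
--     ("VH", "Australia"),
-- )
--
-- # Lookup tables built once, grouped by prefix length (2-char prefixes take priority).
-- _TWO = {p: c for p, c in _REG_PREFIX_COUNTRY_HINTS if len(p) == 2}
-- _ONE = {p: c for p, c in _REG_PREFIX_COUNTRY_HINTS if len(p) == 1}
--
-- def _infer_country_from_registration(registration):
--     if not registration:
--         return None
--     reg = str(registration).strip().upper()
--     hit = _TWO.get(reg[:2])
--     if hit is not None: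
--         return hit
--     return _ONE.get(reg[:1])
-- ===== Notes on version B (the rewrite author's own statement) =====
-- stated objective: idiomatic
-- what changed: Replaces the linear startswith scan over the hint tuple with two dicts built once from the table (keyed by 2-char and 1-char prefixes) and two constant-time keyed lookups on reg[:2] then reg[:1].
import Mathlib
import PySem

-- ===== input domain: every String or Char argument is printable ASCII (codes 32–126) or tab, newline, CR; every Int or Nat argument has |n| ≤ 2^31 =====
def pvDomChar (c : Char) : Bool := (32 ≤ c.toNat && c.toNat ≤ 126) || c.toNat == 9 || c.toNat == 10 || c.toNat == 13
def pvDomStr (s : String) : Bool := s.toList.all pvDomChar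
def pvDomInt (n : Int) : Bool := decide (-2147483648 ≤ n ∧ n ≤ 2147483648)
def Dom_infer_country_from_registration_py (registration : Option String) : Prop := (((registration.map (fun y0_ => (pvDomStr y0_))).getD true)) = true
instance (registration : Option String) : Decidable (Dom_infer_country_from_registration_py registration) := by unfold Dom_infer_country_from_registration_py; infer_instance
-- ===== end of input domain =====

-- B differs from A only in structure: keyed lookups by prefix length instead of a linear startswith scan.

-- ===== PORT A =====
-- the module-level hint table (prefixes as char lists, per the List Char string convention)
def pvHints : List (List Char × String) :=
  [(['N'], "United States"), (['C'], "Canada"), (['G'], "United Kingdom"),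
   (['D'], "Germany"), (['F'], "France"), (['I'], "Italy"),
   (['E','C'], "Spain"), (['P','H'], "Netherlands"), (['R','A'], "Russia"),
   (['R','F'], "Russia"), (['B'], "China"), (['J','A'], "Japan"),
   (['H','L'], "South Korea"), (['V','T'], "India"), (['V','H'], "Australia")]

-- the for-loop with early return
def pvScan : List (List Char × String) → List Char → Option String
  | [], _ => none
  | (p, c) :: rest, reg =>
      if PySem.Chars.startswith reg p then some c else pvScan rest reg

def infer_country_from_registration_py (registration : Option String) : Option String :=
  match registration with
  | none => none
  | some s =>
      if s = "" then none
      else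
        let reg := PySem.Chars.upper (PySem.Chars.strip s.toList)
        pvScan pvHints reg

-- ===== PORT B =====
-- the two module-level dicts, built once from the table, grouped by prefix length
def pvTwo : PySem.Dict (List Char) String :=
  PySem.Dict.ofList (pvHints.filter (fun pc => pc.1.length == 2))
def pvOne : PySem.Dict (List Char) String :=
  PySem.Dict.ofList (pvHints.filter (fun pc => pc.1.length == 1))

def infer_country_from_registration_py_alt (registration : Option String) : Option String :=
  match registration with
  | none => none
  | some s =>
      if s = "" then none
      else
        let reg := PySem.Chars.upper (PySem.Chars.strip s.toList)
        match pvTwo.get? (PySem.Chars.slice reg none (some 2)) with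
        | some c => some c
        | none => pvOne.get? (PySem.Chars.slice reg none (some 1))

-- ===== PRECONDITION & SPEC =====
def Spec_infer_country_from_registration_py (registration : Option String) (out : Option String) : Prop := out = infer_country_from_registration_py_alt registration
instance (registration : Option String) (out : Option String) : Decidable (Spec_infer_country_from_registration_py registration out) := by unfold Spec_infer_country_from_registration_py; infer_instance

-- ===== CLAIM (what is proved, stated in full; the proofs are below) =====
def Claim_equal_infer_country_from_registration_py : Prop := ∀ (registration : Option String), Dom_infer_country_from_registration_py registration → Spec_infer_country_from_registration_py registration (infer_country_from_registration_py registration)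

-- ===== LEMMAS AND PROOFS =====

-- core fact: on any normalized char list the linear scan and the two keyed lookups agree
set_option maxHeartbeats 1000000 in
theorem pvScan_eq_lookup (l : List Char) :
    pvScan pvHints l =
      (match pvTwo.get? (PySem.Chars.slice l none (some 2)) with
       | some c => some c
       | none => pvOne.get? (PySem.Chars.slice l none (some 1))) := by
  have hd2 : pvTwo = PySem.Dict.mk [(['E','C'], "Spain"), (['P','H'], "Netherlands"),
      (['R','A'], "Russia"), (['R','F'], "Russia"), (['J','A'], "Japan"),
      (['H','L'], "South Korea"), (['V','T'], "India"), (['V','H'], "Australia")] := by decide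
  have hd1 : pvOne = PySem.Dict.mk [(['N'], "United States"), (['C'], "Canada"),
      (['G'], "United Kingdom"), (['D'], "Germany"), (['F'], "France"), (['I'], "Italy"),
      (['B'], "China")] := by decide
  have hnil : ∀ (k : List Char), (PySem.Dict.mk ([] : List (List Char × String))).get? k = none := by
    intro k; rfl
  rw [hd2, hd1]
  rcases l with _ | ⟨c1, _ | ⟨c2, rest⟩⟩
  · decide
  · have hs2 : PySem.Chars.slice [c1] none (some 2) = [c1] := by simp [pysem]
    have hs1 : PySem.Chars.slice [c1] none (some 1) = [c1] := by simp [pysem]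
    rw [hs2, hs1]
    conv_lhs => simp only [pvScan, pvHints, PySem.Chars.startswith, List.isPrefixOf, Bool.and_true,
      Bool.and_false, beq_iff_eq, Bool.and_eq_true, if_false]
    conv_rhs => simp only [PySem.Dict.get?_mk_cons, hnil, List.cons_beq_cons,
      beq_self_eq_true, Bool.and_true, beq_iff_eq, Bool.and_eq_true]
    by_cases h0 : 'N' = c1
    · subst h0; simp
    by_cases h1 : 'C' = c1
    · subst h1; simp
    by_cases h2 : 'G' = c1
    · subst h2; simp
    by_cases h3 : 'D' = c1
    · subst h3; simp
    by_cases h4 : 'F' = c1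
    · subst h4; simp
    by_cases h5 : 'I' = c1
    · subst h5; simp
    by_cases h6 : 'B' = c1
    · subst h6; simp
    simp [h0, h1, h2, h3, h4, h5, h6]
  · have hs2 : PySem.Chars.slice (c1 :: c2 :: rest) none (some 2) = [c1, c2] := by simp [pysem]
    have hs1 : PySem.Chars.slice (c1 :: c2 :: rest) none (some 1) = [c1] := by simp [pysem]
    rw [hs2, hs1]
    conv_lhs => simp only [pvScan, pvHints, PySem.Chars.startswith, List.isPrefixOf, Bool.and_true,
      beq_iff_eq, Bool.and_eq_true]
    conv_rhs => simp only [PySem.Dict.get?_mk_cons, hnil, List.cons_beq_cons,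
      beq_self_eq_true, Bool.and_true, beq_iff_eq, Bool.and_eq_true]
    by_cases h0 : 'N' = c1
    · subst h0; simp
    by_cases h1 : 'C' = c1
    · subst h1; simp
    by_cases h2 : 'G' = c1
    · subst h2; simp
    by_cases h3 : 'D' = c1
    · subst h3; simp
    by_cases h4 : 'F' = c1
    · subst h4; simp
    by_cases h5 : 'I' = c1
    · subst h5; simp
    by_cases h6 : 'B' = c1
    · subst h6; simp
    by_cases h7 : 'E' = c1
    · subst h7; simp; split_ifs <;> simp_all
    by_cases h8 : 'P' = c1
    · subst h8; simp; split_ifs <;> simp_all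
    by_cases h9 : 'R' = c1
    · subst h9; simp; split_ifs <;> simp_all
    by_cases h10 : 'J' = c1
    · subst h10; simp; split_ifs <;> simp_all
    by_cases h11 : 'H' = c1
    · subst h11; simp; split_ifs <;> simp_all
    by_cases h12 : 'V' = c1
    · subst h12; simp; split_ifs <;> simp_all
    simp [h0, h1, h2, h3, h4, h5, h6, h7, h8, h9, h10, h11, h12]

-- ===== VERDICT (by name: the statement is the Claim_ definition above) =====
theorem infer_country_from_registration_py_spec : Claim_equal_infer_country_from_registration_py := by
  intro registration _
  unfold Spec_infer_country_from_registration_py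
  cases registration with
  | none => rfl
  | some s =>
      simp only [infer_country_from_registration_py, infer_country_from_registration_py_alt]
      split_ifs with h
      · rfl
      · exact pvScan_eq_lookup _
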